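-- pv_equiv track=rewrite | github.com/josephrpeak/binary_multiplication_algorithms | hursonsscheme.py | generateCarryList
-- ===== SOURCE A (Python) =====
-- def generateCarryList(lst):
--   count = 0
--   carry = 0
--   carry_list = []
--
--   for i in range(len(lst[0])):
--     count = 0
--     for j in range(len(lst)):
--       if(lst[j][-i-1] == '1'):
--         count += 1
--
--     carry_list.append(count)
--
--   for i in range(len(carry_list)-1):
--     carry_list[i+1] += carry_list[i] // 2
--
--   return carry_list
-- ===== SOURCE B (Python) =====
-- def generateCarryList(lst):
--   out = []
--   carry = 0
--   for i in range(len(lst[0])):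
--     total = carry + sum(row[-i-1] == '1' for row in lst)
--     out.append(total)
--     carry = total // 2
--   return out
-- ===== Notes on version B (the rewrite author's own statement) =====
-- stated objective: simpler
-- what changed: A counts every bit column into a list and then runs a second in-place pass adding each element's halved predecessor; B fuses both into one left-to-right sweep that keeps a running carry and emits each column's final value immediately, with no mutation pass.
import Mathlib
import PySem

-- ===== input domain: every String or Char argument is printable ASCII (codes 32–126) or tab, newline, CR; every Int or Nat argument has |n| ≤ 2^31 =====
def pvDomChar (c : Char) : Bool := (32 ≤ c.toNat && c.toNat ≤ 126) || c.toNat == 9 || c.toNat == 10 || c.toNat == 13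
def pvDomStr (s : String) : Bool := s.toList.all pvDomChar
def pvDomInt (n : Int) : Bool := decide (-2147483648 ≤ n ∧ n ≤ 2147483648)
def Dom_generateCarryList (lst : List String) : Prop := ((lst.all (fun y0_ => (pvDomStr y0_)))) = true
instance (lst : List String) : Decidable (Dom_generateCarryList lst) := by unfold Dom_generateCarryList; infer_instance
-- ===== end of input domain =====

-- B fuses A's two passes (count columns, then propagate carries in place) into one
-- carry-accumulating sweep; objective: simpler (return value proved equal on Pre_).

-- ===== PORT A =====
def generateCarryList (lst : List String) : List Int :=
  let carryList : List Int :=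
    (PySem.List.pyRange 0 (PySem.Str.len (PySem.List.pyGetD lst 0 "")) 1).foldl
      (fun carryList i =>
        let count : Int :=
          (PySem.List.pyRange 0 (lst.length : Int) 1).foldl
            (fun count j =>
              if PySem.Str.pyGet? (PySem.List.pyGetD lst j "") (-i - 1) = some '1' then
                count + 1
              else
                count)
            0
        carryList ++ [count])
      []
  (PySem.List.pyRange 0 ((carryList.length : Int) - 1) 1).foldl
    (fun a i =>
      PySem.List.pySetD a (i + 1)
        (PySem.List.pyGetD a (i + 1) 0 + PySem.Int.floordiv (PySem.List.pyGetD a i 0) 2))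
    carryList

-- ===== PORT B =====
-- sum(row[-i-1] == '1' for row in lst): a fold over the rows adding 1 per match
def pvColCount (lst : List String) (i : Int) : Int :=
  lst.foldl (fun c row => if PySem.Str.pyGet? row (-i - 1) = some '1' then c + 1 else c) 0

-- the fused sweep: column index i, remaining-column fuel k, running carry
def pvSweep (lst : List String) (carry : Int) : Nat → Nat → List Int
  | _, 0 => []
  | i, k + 1 =>
    let total := pvColCount lst i + carry
    total :: pvSweep lst (PySem.Int.floordiv total 2) (i + 1) k

def generateCarryList_alt (lst : List String) : List Int :=
  pvSweep lst 0 0 (PySem.Str.len (PySem.List.pyGetD lst 0 "")).toNat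

-- ===== PRECONDITION & SPEC =====
-- Pre_ excludes exactly the inputs where Python A raises: the empty list (lst[0] is an
-- IndexError) and lists with a row shorter than lst[0] (row[-i-1] is an IndexError).
def Pre_generateCarryList (lst : List String) : Prop :=
  lst ≠ [] ∧ ∀ s ∈ lst, (lst.headD "").toList.length ≤ s.toList.length
instance (lst : List String) : Decidable (Pre_generateCarryList lst) := by
  unfold Pre_generateCarryList; infer_instance
def pvWitness_generateCarryList : List String := ["101", "011"]
def Spec_generateCarryList (lst : List String) (out : List Int) : Prop := out = generateCarryList_alt lst
instance (lst : List String) (out : List Int) : Decidable (Spec_generateCarryList lst out) := by unfold Spec_generateCarryList; infer_instance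

-- ===== CLAIM (what is proved, stated in full; the proofs are below) =====
def Claim_equal_generateCarryList : Prop := ∀ (lst : List String), Dom_generateCarryList lst → Pre_generateCarryList lst → Spec_generateCarryList lst (generateCarryList lst)

-- ===== LEMMAS AND PROOFS =====

-- the carry recurrence on an already-computed counts list
def pvScan : List Int → Int → List Int
  | [], _ => []
  | x :: xs, carry => (x + carry) :: pvScan xs (PySem.Int.floordiv (x + carry) 2)

-- A's in-place update step
def pvStep (a : List Int) (i : Int) : List Int :=
  PySem.List.pySetD a (i + 1)
    (PySem.List.pyGetD a (i + 1) 0 + PySem.Int.floordiv (PySem.List.pyGetD a i 0) 2)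

theorem pvStep_cons (a : List Int) (x : Int) (k : Nat) :
    pvStep (x :: a) ((k : Int) + 1) = x :: pvStep a (k : Int) := by
  unfold pvStep
  rw [show ((k : Int) + 1 + 1) = ((k + 2 : Nat) : Int) by push_cast; ring,
      show ((k : Int) + 1) = ((k + 1 : Nat) : Int) by push_cast; ring]
  simp only [PySem.List.pySetD_natCast, PySem.List.pyGetD_natCast,
    List.set_cons_succ, List.getD_cons_succ]

theorem pv_cons_foldl (l : List Nat) (a : List Int) (x : Int) :
    l.foldl (fun (b : List Int) (k : Nat) => pvStep b ((k : Int) + 1)) (x :: a)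
      = x :: l.foldl (fun (b : List Int) (k : Nat) => pvStep b (k : Int)) a := by
  induction l generalizing a x with
  | nil => rfl
  | cons k l ih => simp only [List.foldl_cons, pvStep_cons]; exact ih _ _

theorem pvStep_zero (x y : Int) (c : List Int) :
    pvStep (x :: y :: c) 0 = x :: (y + PySem.Int.floordiv x 2) :: c := by
  unfold pvStep
  rw [show ((0 : Int) + 1) = ((1 : Nat) : Int) by norm_num,
      show (0 : Int) = ((0 : Nat) : Int) by norm_num]
  simp only [PySem.List.pySetD_natCast, PySem.List.pyGetD_natCast,
    List.set_cons_succ, List.getD_cons_succ, List.getD_cons_zero, List.set_cons_zero]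

theorem pv_pass2_core (c : List Int) :
    ∀ (x carry : Int),
      (List.range c.length).foldl (fun (a : List Int) (k : Nat) => pvStep a (k : Int))
          ((x + carry) :: c)
        = pvScan (x :: c) carry := by
  induction c with
  | nil => intro x carry; rfl
  | cons y c ih =>
    intro x carry
    rw [show (y :: c).length = c.length + 1 from rfl, List.range_succ_eq_map,
        List.foldl_cons, List.foldl_map]
    have h0 : pvStep ((x + carry) :: y :: c) (((0 : Nat) : Int))
        = (x + carry) :: (y + PySem.Int.floordiv (x + carry) 2) :: c := by
      rw [show (((0 : Nat) : Int)) = (0 : Int) by norm_num]; exact pvStep_zero _ _ _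
    rw [h0]
    have hsh := pv_cons_foldl (List.range c.length)
      ((y + PySem.Int.floordiv (x + carry) 2) :: c) (x + carry)
    rw [show (fun (a : List Int) (k : Nat) => pvStep a ((Nat.succ k : Nat) : Int))
          = (fun (b : List Int) (k : Nat) => pvStep b ((k : Int) + 1)) by
        funext b k; push_cast; rfl]
    rw [hsh, ih y (PySem.Int.floordiv (x + carry) 2)]
    rfl

theorem pv_pass2 (c : List Int) :
    (PySem.List.pyRange 0 ((c.length : Int) - 1) 1).foldl
        (fun (a : List Int) (i : Int) => pvStep a i) c
      = pvScan c 0 := by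
  cases c with
  | nil =>
    rw [show (((List.nil (α := Int)).length : Int) - 1) = (-1 : Int) by simp,
        PySem.List.pyRange_one_eq_nil (by norm_num)]
    rfl
  | cons x c =>
    rw [show (((x :: c).length : Int) - 1) = ((c.length : Nat) : Int) by
          simp,
        PySem.List.pyRange_one, List.foldl_map]
    rw [show (((c.length : Nat) : Int) - 0).toNat = c.length by simp]
    rw [show (fun (a : List Int) (k : Nat) => pvStep a ((0 : Int) + (k : Int)))
          = (fun (a : List Int) (k : Nat) => pvStep a (k : Int)) by
        funext a k; rw [zero_add]]
    have h := pv_pass2_core c x 0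
    rw [add_zero] at h
    exact h

theorem pv_sweep_scan (lst : List String) :
    ∀ (k i : Nat) (carry : Int),
      pvSweep lst carry i k
        = pvScan ((List.range' i k).map (fun (j : Nat) => pvColCount lst (j : Int))) carry := by
  intro k
  induction k with
  | zero => intro i carry; rfl
  | succ k ih =>
    intro i carry
    rw [List.range'_succ, List.map_cons]
    show (pvColCount lst i + carry) ::
        pvSweep lst (PySem.Int.floordiv (pvColCount lst i + carry) 2) (i + 1) k = _
    rw [ih (i + 1) (PySem.Int.floordiv (pvColCount lst i + carry) 2)]
    rfl

theorem pv_pass1 (lst : List String) (n : Int) :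
    (PySem.List.pyRange 0 n 1).foldl
      (fun (carryList : List Int) (i : Int) =>
        carryList ++
          [(PySem.List.pyRange 0 (lst.length : Int) 1).foldl
            (fun (count : Int) (j : Int) =>
              if PySem.Str.pyGet? (PySem.List.pyGetD lst j "") (-i - 1) = some '1' then
                count + 1
              else count) 0])
      []
      = (List.range n.toNat).map (fun (j : Nat) => pvColCount lst (j : Int)) := by
  have hinner : ∀ i : Int,
      (PySem.List.pyRange 0 (lst.length : Int) 1).foldl
        (fun (count : Int) (j : Int) =>
          if PySem.Str.pyGet? (PySem.List.pyGetD lst j "") (-i - 1) = some '1' then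
            count + 1
          else count) 0 = pvColCount lst i := by
    intro i
    have h := PySem.List.foldl_pyRange_pyGetD (xs := lst) (a := 0)
      (f := fun (c : Int) (row : String) =>
        if PySem.Str.pyGet? row (-i - 1) = some '1' then c + 1 else c)
      (d := "") (init := (0 : Int)) (by norm_num)
    simpa [pvColCount] using h
  rw [PySem.List.foldl_append_singleton_eq_map]
  simp only [hinner]
  rw [PySem.List.pyRange_one, List.map_map]
  simp only [zero_add, sub_zero, List.nil_append, Function.comp_def]

-- ===== VERDICT (by name: the statement is the Claim_ definition above) =====
theorem generateCarryList_spec : Claim_equal_generateCarryList := by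
  intro lst _ _
  unfold Spec_generateCarryList generateCarryList generateCarryList_alt
  rw [show (fun (a : List Int) (i : Int) =>
        PySem.List.pySetD a (i + 1)
          (PySem.List.pyGetD a (i + 1) 0 + PySem.Int.floordiv (PySem.List.pyGetD a i 0) 2))
      = (fun (a : List Int) (i : Int) => pvStep a i) from rfl]
  rw [pv_pass1 lst (PySem.Str.len (PySem.List.pyGetD lst 0 ""))]
  rw [pv_pass2]
  rw [pv_sweep_scan lst _ 0 0]
  rw [List.range_eq_range']
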